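-- pv_equiv track=rewrite | github.com/sjerkovic/Bioinformatics-specialization | b3part2.py | format_chromosome
-- ===== SOURCE A (Python) =====
-- def format_chromosome(chromosome):
--     p = chromosome.split(sep='(')
--     p = [v[:-1] for v in p]
--     p = [v.split() for v in p]
--     p = [[int(v) for v in group] for group in p]
--     b = []
--     for i in p[1:]:
--         for j in i:
--             b.append(j)
--     return p[1:]
-- ===== SOURCE B (Python) =====
-- def format_chromosome(chromosome):
--     _, sep, rest = chromosome.partition('(')
--     if not sep:
--         return []
--     piece, sep2, tail = rest.partition('(')
--     groups = [[int(v) for v in piece[:-1].split()]]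
--     if sep2:
--         groups += format_chromosome('(' + tail)
--     return groups
-- ===== Notes on version B (the rewrite author's own statement) =====
-- stated objective: simpler
-- what changed: B replaces A's split-then-transform pipeline (split on the left parenthesis, then four whole-list passes plus a dead flattening loop) with a recursive descent using str.partition, emitting each integer group as soon as its piece is isolated and never touching the discarded prefix.
-- crash fix: On inputs whose last-char-stripped prefix before the first left parenthesis contains a token that int() rejects (while all later pieces parse), A raises ValueError; B never parses that discarded prefix and returns the remaining groups, e.g. [[1]] for 'xy(1)'. — e.g. on format_chromosome("xy(1)"): A raises ValueError, B returns [[1]]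
import Mathlib
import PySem

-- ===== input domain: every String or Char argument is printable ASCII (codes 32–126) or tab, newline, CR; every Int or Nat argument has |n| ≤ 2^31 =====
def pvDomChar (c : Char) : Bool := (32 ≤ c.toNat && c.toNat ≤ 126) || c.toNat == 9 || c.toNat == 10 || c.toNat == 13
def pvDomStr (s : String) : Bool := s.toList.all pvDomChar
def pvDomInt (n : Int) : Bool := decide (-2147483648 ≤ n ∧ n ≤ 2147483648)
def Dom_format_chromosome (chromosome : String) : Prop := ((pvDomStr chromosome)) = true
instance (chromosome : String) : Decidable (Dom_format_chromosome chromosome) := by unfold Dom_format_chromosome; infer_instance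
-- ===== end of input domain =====

-- B replaces A's split-then-four-passes pipeline (and its dead flattening loop) with a
-- recursive descent over partition('('), emitting each integer group as it is found; simpler shape, same values.

-- ===== PORT A =====
def format_chromosome (chromosome : String) : List (List Int) :=
  let p := ((PySem.Str.split? chromosome "(").getD [])
  let p := p.map (fun v => PySem.Str.slice v none (some (-1)))
  let p := p.map (fun v => PySem.Str.split₀ v)
  let p := p.map (fun group => group.map (fun v => (PySem.Int.ofStr? v).getD 0))
  -- the b-loop of A (its result is unused, transliterated faithfully)
  let _b := (PySem.List.slice p (some 1) none).foldl
    (fun b i => i.foldl (fun b j => b ++ [j]) b) ([] : List Int)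
  PySem.List.slice p (some 1) none

-- ===== PORT B =====
-- hand port of str.partition('(') on the char list (single-char separator): exact —
-- returns (text before the first '(', whether '(' occurs, text after it).
def pvPart (cs : List Char) : List Char × Bool × List Char :=
  match cs with
  | [] => ([], false, [])
  | c :: t =>
    if c = '(' then ([], true, t)
    else
      let r := pvPart t
      (c :: r.1, r.2.1, r.2.2)

-- one group: [int(v) for v in piece[:-1].split()]
def pvGroup (piece : List Char) : List Int :=
  (PySem.Chars.split₀ (PySem.List.slice piece none (some (-1)))).map
    (fun v => (PySem.Int.ofStr? (String.ofList v)).getD 0)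

-- Source B's recursion on the suffix '(' ++ tail; fuel (strictly more than the length, proved
-- sufficient in fcAltGo_eq) only makes the recursion structural, the computation is Source B's.
def fcAltGo : Nat → List Char → List (List Int)
  | 0, _ => []
  | fuel + 1, cs =>
    let r := pvPart cs
    if r.2.1 = true then
      let r2 := pvPart r.2.2
      let g := pvGroup r2.1
      if r2.2.1 = true then g :: fcAltGo fuel ('(' :: r2.2.2) else [g]
    else []

def format_chromosome_alt (chromosome : String) : List (List Int) :=
  fcAltGo (chromosome.toList.length + 1) chromosome.toList

-- ===== PRECONDITION & SPEC =====
-- Pre_: every whitespace token of every last-char-stripped '('-piece parses as an int —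
-- exactly the inputs where Python's int() raises no ValueError, so where A returns.
def Pre_format_chromosome (chromosome : String) : Prop :=
  ∀ piece ∈ ((PySem.Str.split? chromosome "(").getD []),
    ∀ v ∈ PySem.Str.split₀ (PySem.Str.slice piece none (some (-1))),
      (PySem.Int.ofStr? v).isSome = true
instance (chromosome : String) : Decidable (Pre_format_chromosome chromosome) := by
  unfold Pre_format_chromosome; infer_instance
def pvWitness_format_chromosome : String := "(+1 -2 3)(4)"

-- A raises ValueError when a token of the (last-char-stripped) prefix before the first '('
-- fails int(); B never parses that discarded prefix and returns the groups after the '('s.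
def Raises_format_chromosome (chromosome : String) : Prop :=
  (PySem.Str.split? chromosome "(").getD [] ≠ [] ∧
  (¬ ∀ v ∈ PySem.Str.split₀ (PySem.Str.slice
        (((PySem.Str.split? chromosome "(").getD []).headD "") none (some (-1))),
      (PySem.Int.ofStr? v).isSome = true) ∧
  ∀ piece ∈ ((PySem.Str.split? chromosome "(").getD []).drop 1,
    ∀ v ∈ PySem.Str.split₀ (PySem.Str.slice piece none (some (-1))),
      (PySem.Int.ofStr? v).isSome = true
instance (chromosome : String) : Decidable (Raises_format_chromosome chromosome) := by
  unfold Raises_format_chromosome; infer_instance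
def pvRaiseWitness_format_chromosome : String := "xy(1)"
def pvRaiseWitnessOut_format_chromosome : List (List Int) := [[1]]

def Spec_format_chromosome (chromosome : String) (out : List (List Int)) : Prop := out = format_chromosome_alt chromosome
instance (chromosome : String) (out : List (List Int)) : Decidable (Spec_format_chromosome chromosome out) := by unfold Spec_format_chromosome; infer_instance

-- ===== CLAIM (what is proved, stated in full; the proofs are below) =====
def Claim_equal_format_chromosome : Prop := ∀ (chromosome : String), Dom_format_chromosome chromosome → Pre_format_chromosome chromosome → Spec_format_chromosome chromosome (format_chromosome chromosome)
def Claim_raises_format_chromosome : Prop := (∀ (chromosome : String), Dom_format_chromosome chromosome → Raises_format_chromosome chromosome → ¬ Pre_format_chromosome chromosome) ∧ (Dom_format_chromosome (pvRaiseWitness_format_chromosome) ∧ Raises_format_chromosome (pvRaiseWitness_format_chromosome) ∧ format_chromosome_alt (pvRaiseWitness_format_chromosome) = pvRaiseWitnessOut_format_chromosome)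

-- ===== LEMMAS AND PROOFS =====

theorem pvPart_rest_length (cs : List Char) (h : (pvPart cs).2.1 = true) :
    (pvPart cs).2.2.length < cs.length := by
  induction cs with
  | nil => simp [pvPart] at h
  | cons c t ih =>
    by_cases hc : c = '('
    · simp [pvPart, hc]
    · simp only [pvPart, if_neg hc] at h ⊢
      exact Nat.lt_succ_of_lt (ih h)

-- clean recursive characterisation of splitting a char list on the single char '('
def pvSplitP (cs : List Char) : List (List Char) :=
  match cs with
  | [] => [[]]
  | c :: t => if c = '(' then [] :: pvSplitP t else (pvSplitP t).modifyHead (c :: ·)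

theorem pvSplitP_ne_nil (cs : List Char) : pvSplitP cs ≠ [] := by
  cases cs with
  | nil => simp [pvSplitP]
  | cons c t =>
    by_cases hc : c = '('
    · simp [pvSplitP, hc]
    · simp only [pvSplitP, if_neg hc]
      intro h
      exact pvSplitP_ne_nil t (by simpa using congrArg List.length h)

theorem pvModifyHead_id (l : List (List Char)) : l.modifyHead (fun x => x) = l := by
  cases l <;> simp

theorem splitOn_go_paren (l : List Char) :
    ∀ (fuel : Nat) (cur : List Char) (acc : List (List Char)), l.length ≤ fuel →
    PySem.Chars.splitOn.go ['('] fuel l cur acc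
      = acc.reverse ++ (pvSplitP l).modifyHead (cur.reverse ++ ·) := by
  induction l with
  | nil =>
    intro fuel cur acc _
    cases fuel <;> simp [PySem.Chars.splitOn.go, pvSplitP]
  | cons c t ih =>
    intro fuel cur acc hf
    cases fuel with
    | zero => simp at hf
    | succ fuel =>
      by_cases hc : c = '('
      · have hpre : List.isPrefixOf ['('] (c :: t) = true := by simp [List.isPrefixOf, hc]
        rw [PySem.Chars.splitOn.go, if_pos hpre]
        simp only [List.length_singleton, List.drop_one, List.tail_cons]
        rw [ih fuel [] (cur.reverse :: acc) (Nat.le_of_succ_le_succ hf)]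
        simp [pvSplitP, hc, pvModifyHead_id]
      · have hpre : List.isPrefixOf ['('] (c :: t) = false := by
          simp [List.isPrefixOf]; exact fun h => hc h.symm
        rw [PySem.Chars.splitOn.go, if_neg (by simp [hpre])]
        rw [ih fuel (c :: cur) acc (Nat.le_of_succ_le_succ hf)]
        simp only [pvSplitP, if_neg hc]
        congr 1
        cases h : pvSplitP t with
        | nil => exact absurd h (pvSplitP_ne_nil t)
        | cons a b => simp

theorem splitOn_paren (cs : List Char) :
    PySem.Chars.splitOn cs ['('] = pvSplitP cs := by
  have := splitOn_go_paren cs (cs.length + 1) [] [] (Nat.le_succ _)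
  simpa [PySem.Chars.splitOn, pvModifyHead_id] using this

theorem pvSplitP_part (cs : List Char) :
    pvSplitP cs
      = (pvPart cs).1 :: (if (pvPart cs).2.1 then pvSplitP (pvPart cs).2.2 else []) := by
  induction cs with
  | nil => simp [pvSplitP, pvPart]
  | cons c t ih =>
    by_cases hc : c = '('
    · simp [pvSplitP, pvPart, hc]
    · simp only [pvSplitP, pvPart, if_neg hc]
      rw [ih]
      by_cases h : (pvPart t).2.1 = true <;> simp [h]

theorem fcAltGo_eq (fuel : Nat) :
    ∀ (cs : List Char), cs.length < fuel →
    fcAltGo fuel cs = ((pvSplitP cs).drop 1).map pvGroup := by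
  induction fuel with
  | zero => intro cs h; omega
  | succ fuel ih =>
    intro cs hlen
    rw [fcAltGo, pvSplitP_part cs]
    by_cases hr : (pvPart cs).2.1 = true
    · simp only [hr, if_pos, List.drop_succ_cons, List.drop_zero]
      rw [pvSplitP_part (pvPart cs).2.2]
      have h1 := pvPart_rest_length cs hr
      by_cases hr2 : (pvPart (pvPart cs).2.2).2.1 = true
      · simp only [hr2, if_pos, List.map_cons]
        congr 1
        have h2 := pvPart_rest_length (pvPart cs).2.2 hr2
        rw [ih ('(' :: (pvPart (pvPart cs).2.2).2.2) (by simp; omega)]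
        simp [pvSplitP]
      · simp [hr2]
    · simp [hr]

-- A's staged pipeline collapses to the same map over the pieces after the first
theorem formatA_eq (chromosome : String) :
    format_chromosome chromosome = ((pvSplitP chromosome.toList).drop 1).map pvGroup := by
  have ht : "(".toList = ['('] := rfl
  have h : (PySem.Str.split? chromosome "(").getD []
      = (pvSplitP chromosome.toList).map String.ofList := by
    simp [PySem.Str.split?, PySem.Chars.split?, ht, splitOn_paren]
  simp only [format_chromosome]
  rw [h, PySem.List.slice_from_one]
  rw [List.map_map, List.map_map, List.map_map, ← List.map_tail, List.drop_one]
  apply List.map_congr_left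
  intro piece _
  simp [pvGroup, Function.comp, PySem.Str.split₀, PySem.Str.slice]

-- ===== VERDICT (by name: the statement is the Claim_ definition above) =====
theorem format_chromosome_spec : Claim_equal_format_chromosome := by
  intro chromosome _ _
  unfold Spec_format_chromosome format_chromosome_alt
  rw [formatA_eq, fcAltGo_eq _ _ (Nat.lt_succ_self _)]

theorem format_chromosome_raises : Claim_raises_format_chromosome := by
  unfold Claim_raises_format_chromosome
  refine ⟨?_, by decide⟩
  intro chromosome _ hR hP
  unfold Raises_format_chromosome at hR
  unfold Pre_format_chromosome at hP
  obtain ⟨hne, hbad, -⟩ := hR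
  cases h : (PySem.Str.split? chromosome "(").getD [] with
  | nil => exact hne h
  | cons p0 rest =>
    rw [h] at hbad
    exact hbad (fun v hv => hP p0 (by rw [h]; exact List.mem_cons_self) v hv)

-- self-check: the raise witness is inside Raises_ and B's port returns the stated literal there
theorem pvRaiseWitness_ok :
    Raises_format_chromosome pvRaiseWitness_format_chromosome ∧
      format_chromosome_alt pvRaiseWitness_format_chromosome
        = pvRaiseWitnessOut_format_chromosome :=
  ⟨format_chromosome_raises.2.2.1, format_chromosome_raises.2.2.2⟩
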